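-- pv_equiv track=rewrite | github.com/devsigner9920/algorithm | code/prgrms-level-1-practice_test.py | solution
-- ===== SOURCE A (Python) =====
-- def solution(answers):
--     answer = []
--     forgive_1 = [i for i in range(1, 6)]
--     forgive_2 = [2, 1, 2, 3, 2, 4, 2, 5]
--     forgive_3 = [3, 3, 1, 1, 2, 2, 4, 4, 5, 5]
--
--     cnt_1 = 0
--     cnt_2 = 0
--     cnt_3 = 0
--
--     answer_1 = 0
--     answer_2 = 0
--     answer_3 = 0
--
--     for ans in answers:
--         if ans == forgive_1[cnt_1]:
--             answer_1 += 1
--         if ans == forgive_2[cnt_2]: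
--             answer_2 += 1
--         if ans == forgive_3[cnt_3]:
--             answer_3 += 1
--
--         if cnt_1 == len(forgive_1) - 1:
--             cnt_1 = 0
--         else:
--             cnt_1 += 1
--
--         if cnt_2 == len(forgive_2) - 1:
--             cnt_2 = 0
--         else:
--             cnt_2 += 1
--
--         if cnt_3 == len(forgive_3) - 1:
--             cnt_3 = 0
--         else:
--             cnt_3 += 1
--
--     max_answer = max(answer_1, answer_2, answer_3)
--     if max_answer == answer_1:
--         answer.append(1)
--     if max_answer == answer_2:
--         answer.append(2)
--     if max_answer == answer_3:
--         answer.append(3)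
--
--     return answer
-- ===== SOURCE B (Python) =====
-- def solution(answers):
--     # The three patterns all repeat with period lcm(5, 8, 10) = 40, so a histogram of
--     # (position mod 40, answer) pairs determines every score.  One pass builds the
--     # histogram; each score is then read off from just the 40 residue classes.
--     hist = {}
--     for i, a in enumerate(answers):
--         key = (i % 40, a)
--         hist[key] = hist.get(key, 0) + 1
--     patterns = [[1, 2, 3, 4, 5], [2, 1, 2, 3, 2, 4, 2, 5], [3, 3, 1, 1, 2, 2, 4, 4, 5, 5]]
--     scores = [sum(hist.get((r, p[r % len(p)]), 0) for r in range(40)) for p in patterns]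
--     best = max(scores)
--     return [i + 1 for i, s in enumerate(scores) if s == best]
-- ===== Notes on version B (the rewrite author's own statement) =====
-- stated objective: alternative
-- what changed: Instead of scanning the answers against the cyclic patterns (A's single interleaved pass with three cycling counters), B builds a histogram keyed by (position mod 40, answer) in one pass -- 40 = lcm of the three pattern lengths -- and then reads each pattern's score off the 40 residue classes alone, so no per-element pattern comparison happens at all.
import Mathlib
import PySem

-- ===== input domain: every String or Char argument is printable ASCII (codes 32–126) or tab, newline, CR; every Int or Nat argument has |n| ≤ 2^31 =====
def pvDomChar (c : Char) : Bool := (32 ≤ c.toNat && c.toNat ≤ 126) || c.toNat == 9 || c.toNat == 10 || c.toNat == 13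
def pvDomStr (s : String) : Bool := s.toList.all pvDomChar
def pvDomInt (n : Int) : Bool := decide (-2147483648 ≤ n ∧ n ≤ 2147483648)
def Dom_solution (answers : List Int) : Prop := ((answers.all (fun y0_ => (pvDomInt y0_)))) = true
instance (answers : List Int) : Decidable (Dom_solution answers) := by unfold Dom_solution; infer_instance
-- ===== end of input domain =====

-- B replaces A's interleaved pattern scan by a histogram keyed by (position mod 40, answer)
-- (40 = lcm of the pattern lengths), from which each score is read off (objective: alternative).

-- ===== PORT A =====
-- one loop iteration: state (cnt_1, cnt_2, cnt_3, answer_1, answer_2, answer_3)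
def solStep (f1 f2 f3 : List Int) :
    (Nat × Nat × Nat × Int × Int × Int) → Int → (Nat × Nat × Nat × Int × Int × Int)
  | (c1, c2, c3, a1, a2, a3), ans =>
    let a1' := if ans = f1.getD c1 0 then a1 + 1 else a1
    let a2' := if ans = f2.getD c2 0 then a2 + 1 else a2
    let a3' := if ans = f3.getD c3 0 then a3 + 1 else a3
    let c1' := if c1 = f1.length - 1 then 0 else c1 + 1
    let c2' := if c2 = f2.length - 1 then 0 else c2 + 1
    let c3' := if c3 = f3.length - 1 then 0 else c3 + 1
    (c1', c2', c3', a1', a2', a3')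

def solution (answers : List Int) : List Int :=
  let forgive1 : List Int := PySem.List.pyRange 1 6 1
  let forgive2 : List Int := [2, 1, 2, 3, 2, 4, 2, 5]
  let forgive3 : List Int := [3, 3, 1, 1, 2, 2, 4, 4, 5, 5]
  match answers.foldl (solStep forgive1 forgive2 forgive3) (0, 0, 0, 0, 0, 0) with
  | (_, _, _, a1, a2, a3) =>
    let maxAnswer := max a1 (max a2 a3)
    ([] : List Int)
      ++ (if maxAnswer = a1 then [1] else [])
      ++ (if maxAnswer = a2 then [2] else [])
      ++ (if maxAnswer = a3 then [3] else [])

-- ===== PORT B =====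
-- hist[(i % 40, a)] = hist.get((i % 40, a), 0) + 1  over enumerate(answers)
def histB (answers : List Int) : PySem.Dict (Int × Int) Int :=
  (PySem.List.enumerate answers 0).foldl
    (fun d ia =>
      d.insert (PySem.Int.mod ia.1 40, ia.2)
        (d.getD (PySem.Int.mod ia.1 40, ia.2) 0 + 1))
    PySem.Dict.empty

-- sum(hist.get((r, p[r % len(p)]), 0) for r in range(40))
def scoreB (h : PySem.Dict (Int × Int) Int) (p : List Int) : Int :=
  ((PySem.List.pyRange 0 40 1).map
    (fun r => h.getD (r, PySem.List.pyGetD p (PySem.Int.mod r (PySem.List.len p)) 0) 0)).sum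

def solution_alt (answers : List Int) : List Int :=
  let hist := histB answers
  let patterns : List (List Int) :=
    [[1, 2, 3, 4, 5], [2, 1, 2, 3, 2, 4, 2, 5], [3, 3, 1, 1, 2, 2, 4, 4, 5, 5]]
  let scores := patterns.map (scoreB hist)
  let best := (PySem.List.max? scores (fun y => y)).getD 0
  (PySem.List.enumerate scores 0).filterMap
    (fun is => if is.2 = best then some (is.1 + 1) else none)

-- ===== PRECONDITION & SPEC =====
def Spec_solution (answers : List Int) (out : List Int) : Prop := out = solution_alt answers
instance (answers : List Int) (out : List Int) : Decidable (Spec_solution answers out) := by unfold Spec_solution; infer_instance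

-- ===== CLAIM (what is proved, stated in full; the proofs are below) =====
def Claim_equal_solution : Prop := ∀ (answers : List Int), Dom_solution answers → Spec_solution answers (solution answers)

-- ===== LEMMAS AND PROOFS =====

-- reference count: hits of pattern p (cycled) against l starting at position k
def sFrom (p : List Int) : Nat → List Int → Int
  | _, [] => 0
  | k, a :: t => (if a = p.getD (k % p.length) 0 then 1 else 0) + sFrom p (k + 1) t

-- the key list B's histogram counts, starting at position k
def keysFrom : Nat → List Int → List (Int × Int)
  | _, [] => []
  | k, a :: t => (((k % 40 : Nat) : Int), a) :: keysFrom (k + 1) t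

theorem loopA (l : List Int) (k : Nat) (a1 a2 a3 : Int) :
    l.foldl (solStep [1,2,3,4,5] [2,1,2,3,2,4,2,5] [3,3,1,1,2,2,4,4,5,5])
        (k % 5, k % 8, k % 10, a1, a2, a3)
      = ((k + l.length) % 5, (k + l.length) % 8, (k + l.length) % 10,
         a1 + sFrom [1,2,3,4,5] k l,
         a2 + sFrom [2,1,2,3,2,4,2,5] k l,
         a3 + sFrom [3,3,1,1,2,2,4,4,5,5] k l) := by
  induction l generalizing k a1 a2 a3 with
  | nil => simp [sFrom]
  | cons a t ih =>
    simp only [List.foldl_cons, solStep]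
    norm_num
    have h1 : (if k % 5 = 4 then 0 else k % 5 + 1) = (k + 1) % 5 := by split_ifs <;> omega
    have h2 : (if k % 8 = 7 then 0 else k % 8 + 1) = (k + 1) % 8 := by split_ifs <;> omega
    have h3 : (if k % 10 = 9 then 0 else k % 10 + 1) = (k + 1) % 10 := by split_ifs <;> omega
    simp only [h1, h2, h3]
    rw [ih (k + 1)]
    refine Prod.ext ?_ (Prod.ext ?_ (Prod.ext ?_ (Prod.ext ?_ (Prod.ext ?_ ?_)))) <;>
      simp [sFrom] <;> omega

-- rewriting the key-deriving fold as a plain counter fold over the mapped key list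
theorem foldl_key (l : List (Int × Int)) (d : PySem.Dict (Int × Int) Int) :
    l.foldl
        (fun d ia =>
          d.insert (PySem.Int.mod ia.1 40, ia.2)
            (d.getD (PySem.Int.mod ia.1 40, ia.2) 0 + 1)) d
      = (l.map (fun ia : Int × Int => ((PySem.Int.mod ia.1 40, ia.2) : Int × Int))).foldl
          (fun d x => d.insert x (d.getD x 0 + 1)) d := by
  induction l generalizing d with
  | nil => rfl
  | cons x t ih => simp only [List.foldl_cons, List.map_cons]; exact ih _

theorem enum_map_keys (l : List Int) (k : Nat) :
    ((PySem.List.enumerate l (k : Int)).map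
      (fun ia : Int × Int => ((PySem.Int.mod ia.1 40, ia.2) : Int × Int))) = keysFrom k l := by
  induction l generalizing k with
  | nil => simp [PySem.List.enumerate_nil, keysFrom]
  | cons a t ih =>
    rw [PySem.List.enumerate_cons]
    have hmod : PySem.Int.mod (k : Int) 40 = ((k % 40 : Nat) : Int) := by
      rw [show ((40 : Int)) = ((40 : Nat) : Int) from by norm_num]
      exact PySem.Int.mod_natCast k 40
    have hk1 : (k : Int) + 1 = ((k + 1 : Nat) : Int) := by push_cast; ring
    simp only [List.map_cons, keysFrom, hmod, hk1, ih (k + 1)]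

theorem histB_getD (answers : List Int) (v : Int × Int) :
    (histB answers).getD v 0 = (keysFrom 0 answers).count v := by
  unfold histB
  rw [foldl_key,
    show PySem.List.enumerate answers (0 : Int) = PySem.List.enumerate answers ((0 : Nat) : Int)
      from rfl,
    enum_map_keys answers 0, PySem.Dict.getD_foldl_insert_add_one, PySem.Dict.getD_empty]
  simp

-- a 0/1 indicator sum over range n picks out the single matching index
theorem sum_indicator (n j : Nat) (P : Nat → Prop) [DecidablePred P] :
    ((List.range n).map (fun r => if r = j ∧ P r then (1 : Int) else 0)).sum
      = if j < n ∧ P j then 1 else 0 := by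
  induction n with
  | zero => simp
  | succ n ih =>
    rw [List.range_succ, List.map_append, List.sum_append, ih]
    by_cases hj : j = n
    · subst hj
      by_cases hp : P j <;> simp [hp]
    · have hne : ¬ (n = j ∧ P n) := fun ⟨h, _⟩ => hj h.symm
      by_cases hlt : j < n
      · simp [hne, hlt, Nat.lt_succ_of_lt hlt]
      · have hlt' : ¬ j < n + 1 := by omega
        simp [hne, hlt, hlt']

theorem sum_map_add' (l : List Nat) (f g : Nat → Int) :
    (l.map (fun r => f r + g r)).sum = (l.map f).sum + (l.map g).sum := by
  induction l with
  | nil => simp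
  | cons x t ih => simp only [List.map_cons, List.sum_cons, ih]; ring

-- main bridge: summing counts over the 40 residue classes gives sFrom
theorem sum_count_eq_sFrom (p : List Int) (hdvd : p.length ∣ 40)
    (l : List Int) (k : Nat) :
    ((List.range 40).map
      (fun r => ((keysFrom k l).count (((r : Nat) : Int), p.getD (r % p.length) 0) : Int))).sum
      = sFrom p k l := by
  induction l generalizing k with
  | nil => simp [keysFrom, sFrom]
  | cons a t ih =>
    simp only [keysFrom, sFrom, List.count_cons, beq_iff_eq]
    have hterm : ∀ r : Nat,
        (((keysFrom (k + 1) t).count (((r : Nat) : Int), p.getD (r % p.length) 0) +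
            if ((((k % 40 : Nat) : Int), a) = (((r : Nat) : Int), p.getD (r % p.length) 0))
            then 1 else 0 : Nat) : Int)
        = ((keysFrom (k + 1) t).count (((r : Nat) : Int), p.getD (r % p.length) 0) : Int)
            + (if r = k % 40 ∧ p.getD (r % p.length) 0 = a then (1 : Int) else 0) := by
      intro r
      have hiff : ((((k % 40 : Nat) : Int), a) = (((r : Nat) : Int), p.getD (r % p.length) 0))
          ↔ (r = k % 40 ∧ p.getD (r % p.length) 0 = a) := by
        constructor
        · intro h
          simp only [Prod.mk.injEq] at h
          exact ⟨by exact_mod_cast h.1.symm, h.2.symm⟩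
        · rintro ⟨h1, h2⟩
          subst h1; rw [h2]
      by_cases hc : r = k % 40 ∧ p.getD (r % p.length) 0 = a
      · rw [if_pos (hiff.mpr hc), if_pos hc]; push_cast; ring
      · rw [if_neg (fun hb => hc (hiff.mp hb)), if_neg hc]; push_cast; ring
    rw [congrArg List.sum (List.map_congr_left (fun r _ => hterm r)),
      sum_map_add' (List.range 40), ih (k + 1),
      sum_indicator 40 (k % 40) (fun r => p.getD (r % p.length) 0 = a)]
    have hklt : k % 40 < 40 := Nat.mod_lt _ (by norm_num)
    have hmm : k % 40 % p.length = k % p.length := Nat.mod_mod_of_dvd k hdvd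
    simp only [hklt, true_and, hmm]
    by_cases h : p.getD (k % p.length) 0 = a
    · have h' : a = p.getD (k % p.length) 0 := h.symm
      rw [if_pos h, if_pos h']; ring
    · have h' : ¬ a = p.getD (k % p.length) 0 := fun hh => h hh.symm
      rw [if_neg h, if_neg h']; ring

-- scoreB of the histogram is sFrom for each pattern with length dividing 40
theorem scoreB_eq (answers p : List Int) (hdvd : p.length ∣ 40) :
    scoreB (histB answers) p = sFrom p 0 answers := by
  unfold scoreB
  have hrange : PySem.List.pyRange 0 40 1 = (List.range 40).map (fun n : Nat => (n : Int)) := by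
    decide
  rw [hrange, List.map_map]
  have harg : ∀ r : Nat,
      (histB answers).getD (((r : Nat) : Int),
        PySem.List.pyGetD p (PySem.Int.mod ((r : Nat) : Int) (PySem.List.len p)) 0) 0
      = ((keysFrom 0 answers).count (((r : Nat) : Int), p.getD (r % p.length) 0) : Int) := by
    intro r
    have hlen : PySem.List.len p = ((p.length : Nat) : Int) := by
      simp [PySem.List.len]
    rw [hlen, PySem.Int.mod_natCast, PySem.List.pyGetD_natCast, histB_getD]
  calc ((List.range 40).map
        (fun r : Nat => (histB answers).getD ((r : Int),
          PySem.List.pyGetD p (PySem.Int.mod (r : Int) (PySem.List.len p)) 0) 0)).sum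
      = ((List.range 40).map
          (fun r : Nat => ((keysFrom 0 answers).count ((r : Int), p.getD (r % p.length) 0) : Int))).sum := by
        exact congrArg List.sum (List.map_congr_left (fun r _ => harg r))
    _ = sFrom p 0 answers := sum_count_eq_sFrom p hdvd answers 0

theorem filterAux (x y z m : Int) :
    List.filterMap (fun is => if is.2 = m then some (is.1 + 1) else none)
        [((0:Int), x), (1, y), (2, z)]
      = (if x = m then [(1:Int)] else []) ++ (if y = m then [2] else [])
          ++ (if z = m then [3] else []) := by
  by_cases h1 : x = m <;> by_cases h2 : y = m <;> by_cases h3 : z = m <;>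
    simp [h1, h2, h3]

theorem iteComm (a b : Int) (t e : List Int) :
    (if a = b then t else e) = (if b = a then t else e) := if_congr eq_comm rfl rfl

theorem finalEq (x y z : Int) :
    (([] : List Int)
      ++ (if max x (max y z) = x then [1] else [])
      ++ (if max x (max y z) = y then [2] else [])
      ++ (if max x (max y z) = z then [3] else []))
    = (PySem.List.enumerate [x, y, z] 0).filterMap
        (fun is => if is.2 = (PySem.List.max? [x, y, z] (fun v => v)).getD 0
                   then some (is.1 + 1) else none) := by
  rw [show PySem.List.max? [x, y, z] (fun v => v) = some ([y, z].foldl max x) from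
    PySem.List.max?_id_cons x [y, z]]
  rw [show PySem.List.enumerate [x, y, z] 0 = [(0, x), (1, y), (2, z)] from rfl]
  simp only [Option.getD_some, List.foldl_cons, List.foldl_nil, max_assoc]
  rw [filterAux, iteComm x, iteComm y, iteComm z]
  simp

theorem solution_spec : Claim_equal_solution := by
  intro answers _
  unfold Spec_solution solution solution_alt
  have h := loopA answers 0 0 0 0
  simp only [Nat.zero_mod, zero_add] at h
  simp only [show PySem.List.pyRange 1 6 1 = [1,2,3,4,5] from by decide, h,
    List.map_cons, List.map_nil,
    scoreB_eq answers [1,2,3,4,5] (by norm_num),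
    scoreB_eq answers [2,1,2,3,2,4,2,5] (by norm_num),
    scoreB_eq answers [3,3,1,1,2,2,4,4,5,5] (by norm_num)]
  exact finalEq _ _ _
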